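-- pv_equiv track=rewrite | github.com/iamthegreatdestroyer/faceless-youtube | src/security/ids_alerter.py | _is_suspicious_http
-- ===== SOURCE A (Python) =====
-- def _is_suspicious_http(method: str, uri: str) -> bool:
--     """Check if HTTP request is suspicious"""
--     suspicious_methods = ["TRACE", "CONNECT"]
--     suspicious_patterns = [
--         "../", "..\\", "%2e%2e",  # Path traversal
--         "union", "select", "insert",  # SQL injection
--         "<script>", "javascript:",  # XSS
--     ]
--
--     if method in suspicious_methods:
--         return True
--
--     uri_lower = uri.lower()
--     for pattern in suspicious_patterns:
--         if pattern.lower() in uri_lower: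
--             return True
--
--     return False
-- ===== SOURCE B (Python) =====
-- def _is_suspicious_http(method: str, uri: str) -> bool:
--     """Check if HTTP request is suspicious (positional single-scan variant)"""
--     if method in ("TRACE", "CONNECT"):
--         return True
--     patterns = ("../", "..\\", "%2e%2e",
--                 "union", "select", "insert",
--                 "<script>", "javascript:")
--     low = uri.lower()
--     return any(low.startswith(p, i) for i in range(len(low)) for p in patterns)
-- ===== Notes on version B (the rewrite author's own statement) =====
-- stated objective: alternative
-- what changed: Replaces the pattern-by-pattern substring ('in') loop with a single left-to-right positional scan of the URI that tests all patterns as anchored prefixes at each offset via startswith(p, i).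
import Mathlib
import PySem

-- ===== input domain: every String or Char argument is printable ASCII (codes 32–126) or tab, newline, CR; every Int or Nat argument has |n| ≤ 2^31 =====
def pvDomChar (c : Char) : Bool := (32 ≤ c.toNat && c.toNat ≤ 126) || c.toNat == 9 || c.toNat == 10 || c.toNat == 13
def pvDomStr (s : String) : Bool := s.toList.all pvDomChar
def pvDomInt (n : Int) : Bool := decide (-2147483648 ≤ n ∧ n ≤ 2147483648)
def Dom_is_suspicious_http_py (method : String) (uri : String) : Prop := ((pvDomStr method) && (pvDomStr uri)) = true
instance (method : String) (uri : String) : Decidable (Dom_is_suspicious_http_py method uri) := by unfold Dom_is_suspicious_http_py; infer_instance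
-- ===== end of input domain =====

-- B replaces A's pattern-by-pattern substring loop with a single positional scan of the
-- lowered URI, testing every pattern as an anchored prefix at each offset (objective: alternative).


-- ===== PORT A =====
-- A loops over the suspicious patterns, testing each with substring membership ('in') on the lowered URI.
def pvPatterns : List String :=
  ["../", "..\\", "%2e%2e", "union", "select", "insert", "<script>", "javascript:"]

def is_suspicious_http_py (method : String) (uri : String) : Bool :=
  if ["TRACE", "CONNECT"].contains method then true
  else
    let uri_lower := PySem.Str.lower uri
    pvPatterns.any (fun pattern => PySem.Str.isIn (PySem.Str.lower pattern) uri_lower)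

-- ===== PORT B =====
-- B makes one positional scan over the lowered URI, testing every pattern as an
-- anchored prefix at each offset i (low.startswith(p, i) = the pattern is a prefix of low.drop i,
-- exact here since 0 <= i < len(low)).
def is_suspicious_http_py_alt (method : String) (uri : String) : Bool :=
  if method == "TRACE" || method == "CONNECT" then true
  else
    let low := PySem.Chars.lower uri.toList
    (List.range low.length).any (fun i =>
      pvPatterns.any (fun p => PySem.Chars.startswith (low.drop i) p.toList))

-- ===== PRECONDITION & SPEC =====
def Spec_is_suspicious_http_py (method : String) (uri : String) (out : Bool) : Prop := out = is_suspicious_http_py_alt method uri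
instance (method : String) (uri : String) (out : Bool) : Decidable (Spec_is_suspicious_http_py method uri out) := by unfold Spec_is_suspicious_http_py; infer_instance

-- ===== CLAIM (what is proved, stated in full; the proofs are below) =====
def Claim_equal_is_suspicious_http_py : Prop := ∀ (method : String) (uri : String), Dom_is_suspicious_http_py method uri → Spec_is_suspicious_http_py method uri (is_suspicious_http_py method uri)

-- ===== LEMMAS AND PROOFS =====

-- For a nonempty pattern, substring membership equals an anchored-prefix hit at some offset < length.
theorem isIn_eq_range_any (p s : List Char) (hp : p ≠ []) :
    PySem.Chars.isIn p s =
      (List.range s.length).any (fun i => PySem.Chars.startswith (s.drop i) p) := by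
  by_cases h : PySem.Chars.isIn p s = true
  · rw [h]
    obtain ⟨j, hj⟩ := (PySem.Chars.exists_prefix_drop_iff_isIn p s).mpr h
    have hjlt : j < s.length := by
      by_contra hge
      have hnil : s.drop j = [] := List.drop_eq_nil_of_le (le_of_not_gt hge)
      rw [hnil] at hj
      exact hp (List.prefix_nil.mp hj)
    symm
    simp only [List.any_eq_true, List.mem_range]
    exact ⟨j, hjlt, (PySem.Chars.startswith_iff _ _).mpr hj⟩
  · rw [Bool.not_eq_true] at h
    rw [h]; symm
    simp only [List.any_eq_false, List.mem_range]
    intro i _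
    rw [Bool.not_eq_true, ← Bool.not_eq_true]
    intro hs
    have : PySem.Chars.isIn p s = true :=
      (PySem.Chars.exists_prefix_drop_iff_isIn p s).mp
        ⟨i, (PySem.Chars.startswith_iff _ _).mp hs⟩
    simp [h] at this

-- A lowercase nonempty literal pattern: A's per-pattern test matches B's anchored scan.
theorem per_pattern_aux (p : String) (low : List Char)
    (h1 : PySem.Chars.lower p.toList = p.toList) (h2 : p.toList ≠ []) :
    PySem.Chars.isIn (PySem.Str.lower p).toList low =
      (List.range low.length).any (fun i => PySem.Chars.startswith (low.drop i) p.toList) := by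
  rw [PySem.Str.toList_lower, h1]
  exact isIn_eq_range_any _ low h2

theorem per_pattern (p : String) (hp : p ∈ pvPatterns) (low : List Char) :
    PySem.Chars.isIn (PySem.Str.lower p).toList low =
      (List.range low.length).any (fun i => PySem.Chars.startswith (low.drop i) p.toList) := by
  fin_cases hp <;> exact per_pattern_aux _ low (by decide) (by decide)

-- ===== VERDICT (by name: the statement is the Claim_ definition above) =====
theorem is_suspicious_http_py_spec : Claim_equal_is_suspicious_http_py := by
  intro method uri _
  unfold Spec_is_suspicious_http_py is_suspicious_http_py is_suspicious_http_py_alt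
  have hm : (["TRACE", "CONNECT"].contains method) = (method == "TRACE" || method == "CONNECT") := by
    by_cases h1 : method = "TRACE" <;> by_cases h2 : method = "CONNECT" <;>
      simp [h1, h2]
  rw [hm]
  by_cases h : (method == "TRACE" || method == "CONNECT") = true
  · simp [h]
  · rw [Bool.not_eq_true] at h
    simp only [h, Bool.false_eq_true, reduceIte]
    set low := PySem.Chars.lower uri.toList with hlow
    have hL : (PySem.Str.lower uri).toList = low := (PySem.Str.toList_lower uri).trans hlow.symm
    have hstep : ∀ p ∈ pvPatterns,
        PySem.Str.isIn (PySem.Str.lower p) (PySem.Str.lower uri) =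
          (List.range low.length).any (fun i => PySem.Chars.startswith (low.drop i) p.toList) := by
      intro p hp
      rw [PySem.Str.isIn_eq, hL]
      exact per_pattern p hp low
    refine Bool.eq_iff_iff.mpr ?_
    simp only [List.any_eq_true]
    constructor
    · rintro ⟨p, hp, hs⟩
      rw [hstep p hp] at hs
      simp only [List.any_eq_true] at hs
      obtain ⟨i, hi, h2⟩ := hs
      exact ⟨i, hi, p, hp, h2⟩
    · rintro ⟨i, hi, p, hp, h2⟩
      refine ⟨p, hp, ?_⟩
      rw [hstep p hp]
      simp only [List.any_eq_true]
      exact ⟨i, hi, h2⟩
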